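-- pv_equiv track=rewrite | github.com/eh329/RosalindProblems | Bioinformatics Textbook Track/Generate_the_k-mer_Composition_of_a_String.py | kmer_generator
-- ===== SOURCE A (Python) =====
-- def kmer_generator(k, seq):
--     """
--     Given: An integer k and a string Text.
--     Return: Compositionk(Text) (the k-mers can be provided in any order).
--     """
--
--     end = len(seq) - k + 1
--     kmers = []
--
--     for i in range(0, end):
--
--         kmer = seq[i:k]
--         if kmer not in kmers:
--             kmers.append(kmer)
--
--         k += 1
--
--     kmers.sort()
--
--     return kmers
-- ===== SOURCE B (Python) =====
-- def kmer_generator(k, seq):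
--     subs = [seq[i:i + k] for i in range(len(seq) - k + 1)]
--     subs.sort()
--     out = []
--     for s in subs:
--         if not out or out[-1] != s:
--             out.append(s)
--     return out
-- ===== Notes on version B (the rewrite author's own statement) =====
-- stated objective: alternative
-- what changed: A dedups by scanning the growing result list for membership before each append and then sorts; B collects all length-k substrings with duplicates, sorts once, and removes adjacent duplicates in a single pass.
import Mathlib
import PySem

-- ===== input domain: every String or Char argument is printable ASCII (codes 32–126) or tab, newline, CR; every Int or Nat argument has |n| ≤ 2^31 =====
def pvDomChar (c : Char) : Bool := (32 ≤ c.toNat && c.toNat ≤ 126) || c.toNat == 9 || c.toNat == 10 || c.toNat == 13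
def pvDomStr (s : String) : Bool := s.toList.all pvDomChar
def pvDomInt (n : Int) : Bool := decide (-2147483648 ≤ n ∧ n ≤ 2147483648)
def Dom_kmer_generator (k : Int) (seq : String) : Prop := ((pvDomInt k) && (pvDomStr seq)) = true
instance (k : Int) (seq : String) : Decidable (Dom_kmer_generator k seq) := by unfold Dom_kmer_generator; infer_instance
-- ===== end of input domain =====

-- B replaces A's membership-scan dedup (scan result list before each append, then sort) with
-- collect-all-substrings, sort once, one adjacent-uniqueness pass (objective: alternative).

-- ===== PORT A =====
-- one iteration of A's loop: state is (kmers, current k); slice seq[i:k], append if new, k += 1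
def kmAStep (cs : List Char) (st : List String × Int) (i : Int) : List String × Int :=
  let kmer := String.ofList (PySem.List.slice cs (some i) (some st.2))
  (if kmer ∈ st.1 then st.1 else st.1 ++ [kmer], st.2 + 1)

def kmer_generator (k : Int) (seq : String) : List String :=
  let cs := seq.toList
  let endI : Int := (cs.length : Int) - k + 1
  let st := (PySem.List.pyRange 0 endI).foldl (kmAStep cs) ([], k)
  PySem.List.sorted st.1 (fun x => x)

-- ===== PORT B =====
-- seq[i:i+k]
def kmSub (cs : List Char) (k i : Int) : String :=
  String.ofList (PySem.List.slice cs (some i) (some (i + k)))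

-- 'if not out or out[-1] != s: out.append(s)'
def kmPush (out : List String) (s : String) : List String :=
  if out = [] ∨ out.getLast? ≠ some s then out ++ [s] else out

def kmer_generator_alt (k : Int) (seq : String) : List String :=
  let cs := seq.toList
  let subs := (PySem.List.pyRange 0 ((cs.length : Int) - k + 1)).map (kmSub cs k)
  (subs.mergeSort (fun a b => decide (a ≤ b))).foldl kmPush []

-- ===== PRECONDITION & SPEC =====
def Spec_kmer_generator (k : Int) (seq : String) (out : List String) : Prop := out = kmer_generator_alt k seq
instance (k : Int) (seq : String) (out : List String) : Decidable (Spec_kmer_generator k seq out) := by unfold Spec_kmer_generator; infer_instance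

-- ===== CLAIM (what is proved, stated in full; the proofs are below) =====
def Claim_equal_kmer_generator : Prop := ∀ (k : Int) (seq : String), Dom_kmer_generator k seq → Spec_kmer_generator k seq (kmer_generator k seq)

-- ===== LEMMAS AND PROOFS =====

-- range(0, e) for an arbitrary Int bound e (empty when e ≤ 0)
theorem pyRange_toNat (e : Int) :
    PySem.List.pyRange 0 e = (List.range e.toNat).map (fun (k : Nat) => (k : Int)) := by
  by_cases h : 0 ≤ e
  · have : e = (e.toNat : Int) := (Int.toNat_of_nonneg h).symm
    nth_rewrite 1 [this]
    rw [PySem.List.pyRange_zero_natCast]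
  · have h1 : e.toNat = 0 := Int.toNat_of_nonpos (by omega)
    rw [h1]
    simp [PySem.List.pyRange]
    omega

-- first-occurrence dedup step (the behaviour of A's membership test + append)
def pushNew (acc : List String) (x : String) : List String :=
  if x ∈ acc then acc else acc ++ [x]

-- A's loop over indices a, a+1, …, a+m-1 with running k = k0 + a is a pushNew fold
-- over the fixed-width substrings kmSub cs k0
theorem loopA (cs : List Char) (k0 : Int) :
    ∀ (m a : Nat) (acc : List String),
      ((List.range' a m).map (fun (j : Nat) => (j : Int))).foldl (kmAStep cs) (acc, k0 + (a : Int)) =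
      (((List.range' a m).map (fun (j : Nat) => kmSub cs k0 (j : Int))).foldl pushNew acc,
        k0 + (a : Int) + (m : Int)) := by
  intro m
  induction m with
  | zero =>
    intro a acc
    norm_num
  | succ m ih =>
    intro a acc
    rw [List.range'_succ]
    simp only [List.map_cons, List.foldl_cons]
    have hstep : kmAStep cs (acc, k0 + (a : Int)) (a : Int) =
        (pushNew acc (kmSub cs k0 (a : Int)), k0 + (a : Int) + 1) := by
      simp [kmAStep, pushNew, kmSub, Int.add_comm]
    rw [hstep]
    have h1 : k0 + (a : Int) + 1 = k0 + ((a + 1 : Nat) : Int) := by push_cast; ring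
    rw [h1, ih (a + 1) (pushNew acc (kmSub cs k0 (a : Int)))]
    congr 1
    push_cast
    ring

theorem DA_mem (l : List String) : ∀ (acc : List String) (x : String),
    x ∈ l.foldl pushNew acc ↔ x ∈ acc ∨ x ∈ l := by
  induction l with
  | nil => intro acc x; simp
  | cons y ys ih =>
    intro acc x
    rw [List.foldl_cons, ih]
    unfold pushNew
    split_ifs with h
    · simp only [List.mem_cons]
      constructor
      · rintro (h1 | h1)
        · exact Or.inl h1
        · exact Or.inr (Or.inr h1)
      · rintro (h1 | h1 | h1)
        · exact Or.inl h1
        · exact Or.inl (h1 ▸ h)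
        · exact Or.inr h1
    · simp only [List.mem_append, List.mem_cons]
      tauto

theorem DA_nodup (l : List String) : ∀ (acc : List String), acc.Nodup → (l.foldl pushNew acc).Nodup := by
  induction l with
  | nil => intro acc h; simpa using h
  | cons y ys ih =>
    intro acc h
    rw [List.foldl_cons]
    apply ih
    unfold pushNew
    split_ifs with hy
    · exact h
    · rw [List.nodup_append]
      refine ⟨h, by simp, ?_⟩
      intro a ha b hb
      simp only [List.mem_singleton] at hb
      subst hb
      exact fun he => hy (he ▸ ha)

-- adjacent-uniqueness pass, as a structural recursion (prev = last emitted element)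
def dUFrom (p : String) : List String → List String
  | [] => []
  | x :: xs => if x = p then dUFrom p xs else x :: dUFrom x xs

def dU : List String → List String
  | [] => []
  | x :: xs => x :: dUFrom x xs

theorem foldl_kmPush (l : List String) : ∀ (acc : List String) (p : String),
    acc.getLast? = some p → l.foldl kmPush acc = acc ++ dUFrom p l := by
  induction l with
  | nil => intro acc p _; simp [dUFrom]
  | cons x xs ih =>
    intro acc p hp
    have hne : acc ≠ [] := by intro h; rw [h] at hp; simp at hp
    rw [List.foldl_cons]
    by_cases hxp : x = p
    · have hk : kmPush acc x = acc := by
        unfold kmPush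
        rw [if_neg]
        push Not
        exact ⟨hne, by rw [hp, hxp]⟩
      rw [hk, ih acc p hp]
      simp [dUFrom, hxp]
    · have hk : kmPush acc x = acc ++ [x] := by
        unfold kmPush
        rw [if_pos]
        right
        rw [hp]
        simp
        exact fun h => hxp h.symm
      rw [hk, ih (acc ++ [x]) x (by simp)]
      simp [dUFrom, hxp]
  
theorem foldl_kmPush_nil (l : List String) : l.foldl kmPush [] = dU l := by
  cases l with
  | nil => rfl
  | cons x xs =>
    rw [List.foldl_cons]
    have h : kmPush [] x = [x] := by simp [kmPush]
    rw [h, foldl_kmPush xs [x] x (by simp)]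
    simp [dU]

theorem dUFrom_spec : ∀ (l : List String) (p : String),
    l.Pairwise (· ≤ ·) → (∀ x ∈ l, p ≤ x) →
    (∀ x, x ∈ dUFrom p l ↔ x ∈ l ∧ x ≠ p) ∧ (p :: dUFrom p l).Pairwise (· < ·) := by
  intro l
  induction l with
  | nil =>
    intro p _ _
    refine ⟨?_, ?_⟩
    · intro x; simp [dUFrom]
    · simp [dUFrom]
  | cons x xs ih =>
    intro p hpw hle
    have hx : p ≤ x := hle x (by simp)
    have hxs : xs.Pairwise (· ≤ ·) := (List.pairwise_cons.mp hpw).2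
    have hxle : ∀ y ∈ xs, x ≤ y := (List.pairwise_cons.mp hpw).1
    by_cases hxp : x = p
    · have hple : ∀ y ∈ xs, p ≤ y := fun y hy => hxp ▸ hxle y hy
      obtain ⟨hm, hpw'⟩ := ih p hxs hple
      constructor
      · intro y
        rw [show dUFrom p (x :: xs) = dUFrom p xs from by simp [dUFrom, hxp], hm y]
        constructor
        · rintro ⟨h1, h2⟩; exact ⟨List.mem_cons_of_mem _ h1, h2⟩
        · rintro ⟨h1, h2⟩
          rcases List.mem_cons.mp h1 with h | h
          · exact absurd (h.trans hxp) h2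
          · exact ⟨h, h2⟩
      · rw [show dUFrom p (x :: xs) = dUFrom p xs from by simp [dUFrom, hxp]]
        exact hpw'
    · have hplt : p < x := lt_of_le_of_ne hx (fun h => hxp h.symm)
      obtain ⟨hm, hpw'⟩ := ih x hxs hxle
      have hd : dUFrom p (x :: xs) = x :: dUFrom x xs := by simp [dUFrom, hxp]
      constructor
      · intro y
        rw [hd]
        simp only [List.mem_cons, hm y]
        constructor
        · rintro (h | ⟨h1, _⟩)
          · exact ⟨Or.inl h, h ▸ hxp⟩
          · have : p < y := hplt.trans_le (hxle y h1)
            exact ⟨Or.inr h1, this.ne'⟩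
        · rintro ⟨h1, h2⟩
          rcases h1 with h | h
          · exact Or.inl h
          · by_cases hyx : y = x
            · exact Or.inl hyx
            · exact Or.inr ⟨h, hyx⟩
      · rw [hd]
        refine List.pairwise_cons.mpr ⟨?_, hpw'⟩
        intro y hy
        rcases List.mem_cons.mp hy with h | h
        · exact h ▸ hplt
        · have : y ∈ xs ∧ y ≠ x := (hm y).mp h
          exact hplt.trans_le (hxle y this.1)

theorem dU_mem (l : List String) (hl : l.Pairwise (· ≤ ·)) :
    ∀ x, x ∈ dU l ↔ x ∈ l := by
  cases l with
  | nil => intro x; simp [dU]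
  | cons y ys =>
    intro x
    obtain ⟨hm, _⟩ := dUFrom_spec ys y (List.pairwise_cons.mp hl).2 (List.pairwise_cons.mp hl).1
    simp only [dU, List.mem_cons, hm x]
    constructor
    · rintro (h | ⟨h1, _⟩)
      · exact Or.inl h
      · exact Or.inr h1
    · rintro (h | h)
      · exact Or.inl h
      · by_cases hxy : x = y
        · exact Or.inl hxy
        · exact Or.inr ⟨h, hxy⟩

theorem dU_pairwise (l : List String) (hl : l.Pairwise (· ≤ ·)) :
    (dU l).Pairwise (· < ·) := by
  cases l with
  | nil => simp [dU]
  | cons y ys =>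
    obtain ⟨_, hpw⟩ := dUFrom_spec ys y (List.pairwise_cons.mp hl).2 (List.pairwise_cons.mp hl).1
    exact hpw

-- ===== VERDICT (by name: the statement is the Claim_ definition above) =====
theorem kmer_generator_spec : Claim_equal_kmer_generator := by
  intro k seq _
  unfold Spec_kmer_generator kmer_generator kmer_generator_alt
  simp only []
  set cs := seq.toList with hcs
  set e : Int := (cs.length : Int) - k + 1 with he
  rw [pyRange_toNat]
  -- common list of substrings
  set subsL : List String := (List.range' 0 e.toNat).map (fun (j : Nat) => kmSub cs k (j : Int)) with hsubs
  -- A's loop result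
  have hA : ((List.range e.toNat).map (fun (j : Nat) => (j : Int))).foldl (kmAStep cs) ([], k) =
      (subsL.foldl pushNew [], k + (0 : Int) + (e.toNat : Int)) := by
    rw [List.range_eq_range']
    have := loopA cs k e.toNat 0 []
    simpa using this
  rw [hA]
  -- B's substring list is the same list
  have hB : ((List.range e.toNat).map (fun (j : Nat) => (j : Int))).map (kmSub cs k) = subsL := by
    rw [List.range_eq_range', List.map_map]
    rfl
  rw [hB]
  -- merge-sorted subsL is ≤-pairwise
  have hsorted : (subsL.mergeSort (fun a b => decide (a ≤ b))).Pairwise (· ≤ ·) := by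
    have := List.pairwise_mergeSort (le := fun (a b : String) => decide (a ≤ b))
      (fun a b c h1 h2 => by simp at h1 h2 ⊢; exact le_trans h1 h2)
      (fun a b => by simpa using le_total a b) subsL
    exact this.imp (fun h => by simpa using h)
  rw [foldl_kmPush_nil]
  -- sort-of-dedup = adjacent-unique-of-sort
  apply PySem.List.sorted_eq_of_perm_of_pairwise_lt
  · -- permutation: both nodup with the same members
    apply (List.perm_ext_iff_of_nodup ?_ ?_).mpr
    · intro a
      rw [dU_mem _ hsorted a, List.mem_mergeSort, DA_mem]
      simp
    · exact (dU_pairwise _ hsorted).imp ne_of_lt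
    · exact DA_nodup subsL [] (by simp)
  · have := dU_pairwise _ hsorted
    simpa using this
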